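-- pv_equiv track=rewrite | github.com/fOSTEL/pylab5 | py5laba.py | categorize_symbols
-- ===== SOURCE A (Python) =====
-- def categorize_symbols(symbol_list):
--     list_vow = []
--     list_cons = []
--     list_symb = []
--
--     for symbol in symbol_list:
--         if symbol.isalpha():
--             if symbol in 'aeiouy':
--                 list_vow.append(symbol)
--             else:
--                 list_cons.append(symbol)
--         else:
--             list_symb.append(symbol)
--
--     return list_vow, list_cons, list_symb
-- ===== SOURCE B (Python) =====
-- def categorize_symbols(symbol_list):
--     list_vow = [s for s in symbol_list if s.isalpha() and s in 'aeiouy']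
--     list_cons = [s for s in symbol_list if s.isalpha() and s not in 'aeiouy']
--     list_symb = [s for s in symbol_list if not s.isalpha()]
--     return list_vow, list_cons, list_symb
-- ===== Notes on version B (the rewrite author's own statement) =====
-- stated objective: alternative
-- what changed: Replaces the single loop with nested if/else and three accumulators by three independent filtered passes (list comprehensions), one per category.
import Mathlib
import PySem

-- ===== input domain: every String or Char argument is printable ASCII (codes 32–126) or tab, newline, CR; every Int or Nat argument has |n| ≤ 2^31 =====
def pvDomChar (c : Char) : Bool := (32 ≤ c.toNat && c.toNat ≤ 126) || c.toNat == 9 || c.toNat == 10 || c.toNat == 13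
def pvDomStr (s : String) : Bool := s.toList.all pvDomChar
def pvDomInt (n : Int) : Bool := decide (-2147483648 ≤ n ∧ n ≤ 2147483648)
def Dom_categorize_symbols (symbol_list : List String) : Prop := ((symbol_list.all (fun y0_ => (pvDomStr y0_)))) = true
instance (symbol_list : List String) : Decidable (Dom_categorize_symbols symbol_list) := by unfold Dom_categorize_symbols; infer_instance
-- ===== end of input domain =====

-- ===== PORT A =====
-- B replaces A's single loop with nested branching by three independent filtered passes (same values, order and cost).
def categorize_symbols (symbol_list : List String) : List String × List String × List String :=
  symbol_list.foldl
    (fun (st : List String × List String × List String) symbol =>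
      if PySem.Str.strIsalpha symbol then
        if PySem.Str.isIn symbol "aeiouy" then (st.1 ++ [symbol], st.2.1, st.2.2)
        else (st.1, st.2.1 ++ [symbol], st.2.2)
      else (st.1, st.2.1, st.2.2 ++ [symbol]))
    ([], [], [])

-- ===== PORT B =====
def categorize_symbols_alt (symbol_list : List String) : List String × List String × List String :=
  (symbol_list.filter (fun s => PySem.Str.strIsalpha s && PySem.Str.isIn s "aeiouy"),
   symbol_list.filter (fun s => PySem.Str.strIsalpha s && !PySem.Str.isIn s "aeiouy"),
   symbol_list.filter (fun s => !PySem.Str.strIsalpha s))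

-- ===== PRECONDITION & SPEC =====
def Spec_categorize_symbols (symbol_list : List String) (out : List String × List String × List String) : Prop := out = categorize_symbols_alt symbol_list
instance (symbol_list : List String) (out : List String × List String × List String) : Decidable (Spec_categorize_symbols symbol_list out) := by unfold Spec_categorize_symbols; infer_instance

-- ===== CLAIM (what is proved, stated in full; the proofs are below) =====
def Claim_equal_categorize_symbols : Prop := ∀ (symbol_list : List String), Dom_categorize_symbols symbol_list → Spec_categorize_symbols symbol_list (categorize_symbols symbol_list)

-- ===== LEMMAS AND PROOFS =====

-- ===== VERDICT (by name: the statement is the Claim_ definition above) =====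
theorem categorize_symbols_foldl_inv (l : List String) (v c o : List String) :
    l.foldl
      (fun (st : List String × List String × List String) symbol =>
        if PySem.Chars.strIsalpha symbol.toList then
          if PySem.Chars.isIn symbol.toList ['a', 'e', 'i', 'o', 'u', 'y'] then
            (st.1 ++ [symbol], st.2.1, st.2.2)
          else (st.1, st.2.1 ++ [symbol], st.2.2)
        else (st.1, st.2.1, st.2.2 ++ [symbol]))
      (v, c, o)
    = (v ++ l.filter (fun s => PySem.Chars.strIsalpha s.toList
            && PySem.Chars.isIn s.toList ['a', 'e', 'i', 'o', 'u', 'y']),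
       c ++ l.filter (fun s => PySem.Chars.strIsalpha s.toList
            && !PySem.Chars.isIn s.toList ['a', 'e', 'i', 'o', 'u', 'y']),
       o ++ l.filter (fun s => !PySem.Chars.strIsalpha s.toList)) := by
  induction l generalizing v c o with
  | nil => simp
  | cons x xs ih =>
    simp only [List.foldl_cons, List.filter_cons]
    by_cases ha : PySem.Chars.strIsalpha x.toList
    · by_cases hv : PySem.Chars.isIn x.toList ['a', 'e', 'i', 'o', 'u', 'y']
      · simp only [ha, hv, if_true, Bool.true_and, decide_true, ih]; simp
      · simp only [ha, hv, if_true, if_false, Bool.true_and, Bool.not_false, ih]; simp [hv]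
    · simp only [ha, if_false, Bool.false_and, Bool.not_true, ih]; simp

theorem categorize_symbols_spec : Claim_equal_categorize_symbols := by
  intro symbol_list _
  unfold Spec_categorize_symbols categorize_symbols categorize_symbols_alt
  simpa using categorize_symbols_foldl_inv symbol_list [] [] []
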